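-- pv_equiv track=rewrite | github.com/alexandraback/datacollection | solutions_5690574640250880_1/Python/rosshamish/minesweeper.py | enlargeBoard
-- ===== SOURCE A (Python) =====
-- def enlargeBoard(board, realrows, realcols, rows, cols):
--     realboard = [['*']*realcols for i in range(realrows)]
--
--     rowdif = realrows-rows
--     coldif = realcols-cols
--     for row in range(rows):
--         for col in range(cols):
--             realboard[row+rowdif][col+coldif] = board[row][col]
--
--     return realboard
-- ===== SOURCE B (Python) =====
-- def enlargeBoard(board, realrows, realcols, rows, cols):
--     rowdif = realrows - rows
--     out = []
--     for r in range(realrows):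
--         if r < rowdif:
--             out.append(['*'] * realcols)
--         else:
--             copied = [board[r - rowdif][c] for c in range(cols)]
--             out.append(['*'] * (realcols - len(copied)) + copied)
--     return out
-- ===== Notes on version B (the rewrite author's own statement) =====
-- stated objective: simpler
-- what changed: B builds the enlarged board row-by-row in one pass (padding rows, then each padded-left copy of a board row) instead of prefilling a full star board and overwriting cells in a nested index loop.
-- outside the precondition, e.g. on enlargeBoard([['a', 'b']], 1, 1, 1, 2): A returns [['b']], B returns [['a', 'b']]
import Mathlib
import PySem

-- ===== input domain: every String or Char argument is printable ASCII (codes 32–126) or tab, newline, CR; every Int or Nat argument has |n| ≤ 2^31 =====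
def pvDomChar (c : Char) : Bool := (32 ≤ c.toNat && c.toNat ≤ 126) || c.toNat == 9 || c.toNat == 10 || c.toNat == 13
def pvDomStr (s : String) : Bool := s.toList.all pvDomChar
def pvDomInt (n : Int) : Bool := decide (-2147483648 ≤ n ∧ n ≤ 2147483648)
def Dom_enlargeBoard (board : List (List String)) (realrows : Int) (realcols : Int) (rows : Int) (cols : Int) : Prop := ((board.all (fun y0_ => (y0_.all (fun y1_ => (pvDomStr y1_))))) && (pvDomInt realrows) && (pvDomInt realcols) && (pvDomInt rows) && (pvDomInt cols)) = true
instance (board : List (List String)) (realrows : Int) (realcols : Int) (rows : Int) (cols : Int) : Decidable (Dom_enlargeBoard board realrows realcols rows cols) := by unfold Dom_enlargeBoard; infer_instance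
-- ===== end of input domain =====

-- B builds the enlarged board row-by-row in one pass instead of prefilling a star board and
-- overwriting cells in a nested index loop (objective: simpler).


-- ===== PORT A =====
-- literal port: prefill realrows × realcols of "*", then overwrite cell by cell;
-- pySetD/pyGetD are Python's indexing (negative wraps); their defaults are never reached on Pre_
def enlargeBoard (board : List (List String)) (realrows : Int) (realcols : Int) (rows : Int) (cols : Int) : List (List String) :=
  let realboard := (PySem.List.pyRange 0 realrows 1).map (fun _ => List.replicate realcols.toNat "*")
  let rowdif := realrows - rows
  let coldif := realcols - cols
  (PySem.List.pyRange 0 rows 1).foldl (fun rb row =>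
    (PySem.List.pyRange 0 cols 1).foldl (fun rb col =>
      PySem.List.pySetD rb (row + rowdif)
        (PySem.List.pySetD (PySem.List.pyGetD rb (row + rowdif) [])
          (col + coldif)
          (PySem.List.pyGetD (PySem.List.pyGetD board row []) col ""))) rb) realboard

-- ===== PORT B =====
-- literal port of Source B: single pass, append one finished row per iteration
def enlargeBoard_alt (board : List (List String)) (realrows : Int) (realcols : Int) (rows : Int) (cols : Int) : List (List String) :=
  let rowdif := realrows - rows
  (PySem.List.pyRange 0 realrows 1).foldl (fun out r =>
    out ++ [if r < rowdif then List.replicate realcols.toNat "*"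
            else
              let copied := (PySem.List.pyRange 0 cols 1).map (fun c =>
                PySem.List.pyGetD (PySem.List.pyGetD board (r - rowdif) []) c "")
              List.replicate (realcols - (copied.length : Int)).toNat "*" ++ copied]) []

-- ===== PRECONDITION & SPEC =====
-- Pre_ excludes (a) exactly the inputs on which A raises IndexError (a copy actually happens —
-- rows > 0 and cols > 0 — and the board is too short, a copied row too narrow, realrows ≤ 0,
-- realcols ≤ 0, or a copy target row lies beyond even Python's negative-index wrap range), and
-- (b) the column-shrinking calls cols > realcols, on which A still returns a value: there the
-- function's stated purpose (enlarging into a realrows × realcols board) is unsatisfiable and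
-- the cells' placement, wrapped around the row's left edge by Python's negative indexing, is an
-- accident of A's implementation that no caller could rely on.
def Pre_enlargeBoard (board : List (List String)) (realrows : Int) (realcols : Int) (rows : Int) (cols : Int) : Prop :=
  rows ≤ 0 ∨ cols ≤ 0 ∨
  (0 < realrows ∧ 0 < realcols ∧ rows ≤ 2*realrows ∧ cols ≤ realcols ∧
   rows ≤ (board.length : Int) ∧ ∀ r ∈ board.take rows.toNat, cols ≤ (r.length : Int))
instance (board : List (List String)) (realrows : Int) (realcols : Int) (rows : Int) (cols : Int) : Decidable (Pre_enlargeBoard board realrows realcols rows cols) := by unfold Pre_enlargeBoard; infer_instance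

def pvWitness_enlargeBoard : List (List String) × Int × Int × Int × Int := ([["a", "b"], ["c", "d"]], 3, 3, 2, 2)

def Spec_enlargeBoard (board : List (List String)) (realrows : Int) (realcols : Int) (rows : Int) (cols : Int) (out : List (List String)) : Prop := out = enlargeBoard_alt board realrows realcols rows cols
instance (board : List (List String)) (realrows : Int) (realcols : Int) (rows : Int) (cols : Int) (out : List (List String)) : Decidable (Spec_enlargeBoard board realrows realcols rows cols out) := by unfold Spec_enlargeBoard; infer_instance

-- ===== CLAIM (what is proved, stated in full; the proofs are below) =====
def Claim_equal_enlargeBoard : Prop := ∀ (board : List (List String)) (realrows : Int) (realcols : Int) (rows : Int) (cols : Int), Dom_enlargeBoard board realrows realcols rows cols → Pre_enlargeBoard board realrows realcols rows cols → Spec_enlargeBoard board realrows realcols rows cols (enlargeBoard board realrows realcols rows cols)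

-- ===== LEMMAS AND PROOFS =====

-- Nat-level model of A's inner loop: write f 0 ... f (C-1) at offsets d ... d+C-1 of l
def pvRowWrite (C d : Nat) (f : Nat -> String) (l : List String) : List String :=
  (List.range C).foldl (fun acc c => acc.set (c + d) (f c)) l

-- Nat-level model of A's outer loop
def pvBoardWrite (R C drow dcol : Nat) (g : Nat -> Nat -> String) (rb : List (List String)) : List (List String) :=
  (List.range R).foldl (fun rb r => rb.set (r + drow) (pvRowWrite C dcol (g r) (rb.getD (r + drow) []))) rb

-- a row of the enlarged board mid-loop: full width, star-padded on the left
def pvGoodRow (RC C : Nat) (xs : List String) : Prop :=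
  xs.length = RC ∧ xs.take (RC - C) = List.replicate (RC - C) "*"

theorem pvRowWrite_eq (C d : Nat) (f : Nat -> String) (l : List String) (h : d + C <= l.length) :
    pvRowWrite C d f l = l.take d ++ (List.range C).map f ++ l.drop (d + C) := by
  induction C with
  | zero => simp [pvRowWrite]
  | succ C ih =>
    have h' : d + C <= l.length := by omega
    have hlt : d + C < l.length := by omega
    have hstep : pvRowWrite (C+1) d f l = (pvRowWrite C d f l).set (C + d) (f C) := by
      simp [pvRowWrite, List.range_succ]
    rw [hstep, show C + d = d + C from by omega, ih h']
    rw [List.drop_eq_getElem_cons hlt, List.range_succ, List.map_append]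
    rw [show l.take d ++ List.map f (List.range C) ++ l[d+C] :: l.drop (d+C+1)
        = (l.take d ++ List.map f (List.range C)) ++ l[d+C] :: l.drop (d+C+1) by simp]
    rw [List.set_append]
    have hlen : (l.take d ++ List.map f (List.range C)).length = d + C := by
      simp [List.length_take]; omega
    simp [hlen]
    rw [List.drop_eq_getElem_cons hlt, List.set_cons_zero]
    rw [show d + (C + 1) = d + C + 1 from by omega]

-- factor A's repeated read-modify-write of one row into a single row update (Nat indices)
theorem pvRowFactor (C d i : Nat) (v : Nat -> String) (rb : List (List String)) :
    (List.range C).foldl (fun rb' c => rb'.set i ((rb'.getD i []).set (c + d) (v c))) rb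
      = rb.set i (pvRowWrite C d v (rb.getD i [])) := by
  induction C with
  | zero =>
    simp only [List.range_zero, List.foldl_nil, pvRowWrite]
    by_cases hi : i < rb.length
    . rw [List.getD_eq_getElem _ _ hi]
      exact (List.set_getElem_self hi).symm
    . exact (List.set_eq_of_length_le (by omega)).symm
  | succ C ih =>
    rw [List.range_succ, List.foldl_append, ih]
    by_cases hi : i < rb.length
    . have hset : i < (rb.set i (pvRowWrite C d v (rb.getD i []))).length := by simpa using hi
      simp only [List.foldl_cons, List.foldl_nil]
      rw [List.getD_eq_getElem _ _ hset, List.getElem_set_self, List.set_set]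
      have : pvRowWrite (C+1) d v (rb.getD i []) = (pvRowWrite C d v (rb.getD i [])).set (C + d) (v C) := by
        simp [pvRowWrite, List.range_succ]
      rw [this]
    . have hle : rb.length <= i := by omega
      simp [List.set_eq_of_length_le hle]

theorem pvBoardWrite_eq (R C drow dcol : Nat) (g : Nat -> Nat -> String) (rb : List (List String)) (h : drow + R <= rb.length) :
    pvBoardWrite R C drow dcol g rb =
      rb.take drow ++ (List.range R).map (fun r => pvRowWrite C dcol (g r) (rb.getD (drow + r) [])) ++ rb.drop (drow + R) := by
  induction R with
  | zero => simp [pvBoardWrite]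
  | succ R ih =>
    have h' : drow + R <= rb.length := by omega
    have hlt : drow + R < rb.length := by omega
    have hstep : pvBoardWrite (R+1) C drow dcol g rb
        = (pvBoardWrite R C drow dcol g rb).set (R + drow)
            (pvRowWrite C dcol (g R) ((pvBoardWrite R C drow dcol g rb).getD (R + drow) [])) := by
      simp [pvBoardWrite, List.range_succ]
    have hlen : (rb.take drow ++ (List.range R).map (fun r => pvRowWrite C dcol (g r) (rb.getD (drow + r) []))).length = drow + R := by
      simp [List.length_take]; omega
    have hread : (pvBoardWrite R C drow dcol g rb).getD (R + drow) [] = rb.getD (drow + R) [] := by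
      rw [ih h', show R + drow = drow + R from by omega,
          show rb.take drow ++ (List.range R).map (fun r => pvRowWrite C dcol (g r) (rb.getD (drow + r) [])) ++ rb.drop (drow + R)
            = (rb.take drow ++ (List.range R).map (fun r => pvRowWrite C dcol (g r) (rb.getD (drow + r) []))) ++ rb.drop (drow + R) by simp,
          List.getD_append_right _ _ _ _ (by omega), hlen]
      rw [List.drop_eq_getElem_cons hlt]
      simp
    rw [hstep, hread, ih h', show R + drow = drow + R from by omega]
    rw [List.drop_eq_getElem_cons hlt, List.range_succ, List.map_append]
    rw [show List.take drow rb ++ List.map (fun r => pvRowWrite C dcol (g r) (rb.getD (drow + r) [])) (List.range R) ++ rb[drow+R] :: List.drop (drow+R+1) rb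
        = (List.take drow rb ++ List.map (fun r => pvRowWrite C dcol (g r) (rb.getD (drow + r) [])) (List.range R)) ++ rb[drow+R] :: List.drop (drow+R+1) rb by simp]
    rw [List.set_append, hlen, if_neg (by omega), Nat.sub_self, List.set_cons_zero]
    simp [show drow + (R + 1) = drow + R + 1 from by omega]

-- Python index resolution: characterize pyIdx? results
theorem pvIdx_lt {n : Nat} {i : Int} {k : Nat} (h : PySem.List.pyIdx? n i = some k) : k < n := by
  unfold PySem.List.pyIdx? at h
  split_ifs at h <;> simp_all <;> omega

theorem pvSetD_none {a : Type} (xs : List a) {i : Int} (h : PySem.List.pyIdx? xs.length i = none) (v : a) :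
    PySem.List.pySetD xs i v = xs := by
  simp [PySem.List.pySetD, PySem.List.pySet?, h]

theorem pvSetD_some {a : Type} (xs : List a) {i : Int} {k : Nat} (h : PySem.List.pyIdx? xs.length i = some k) (v : a) :
    PySem.List.pySetD xs i v = xs.set k v := by
  simp [PySem.List.pySetD, PySem.List.pySet?, h]

theorem pvGetD_some {a : Type} (xs : List a) {i : Int} {k : Nat} (h : PySem.List.pyIdx? xs.length i = some k) (d : a) :
    PySem.List.pyGetD xs i d = xs.getD k d := by
  simp [PySem.List.pyGetD, PySem.List.pyGet?, h, List.getD_eq_getElem?_getD]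

-- factor A's repeated read-modify-write of one row, Python-index version
theorem pvRowFactorPy (C d : Nat) (i : Int) (v : Nat -> String) (rb : List (List String)) :
    (List.range C).foldl (fun rb' c => PySem.List.pySetD rb' i ((PySem.List.pyGetD rb' i []).set (c + d) (v c))) rb
      = PySem.List.pySetD rb i (pvRowWrite C d v (PySem.List.pyGetD rb i [])) := by
  induction C with
  | zero =>
    simp only [List.range_zero, List.foldl_nil, pvRowWrite]
    cases h : PySem.List.pyIdx? rb.length i with
    | none => rw [pvSetD_none rb h]
    | some k =>
      have hk : k < rb.length := pvIdx_lt h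
      rw [pvSetD_some rb h, pvGetD_some rb h, List.getD_eq_getElem _ _ hk]
      exact (List.set_getElem_self hk).symm
  | succ C ih =>
    rw [List.range_succ, List.foldl_append, ih]
    simp only [List.foldl_cons, List.foldl_nil]
    cases h : PySem.List.pyIdx? rb.length i with
    | none =>
      rw [pvSetD_none rb h, pvSetD_none rb h, pvSetD_none rb h]
    | some k =>
      have hk : k < rb.length := pvIdx_lt h
      have hX : ∀ X : List String, PySem.List.pyIdx? (rb.set k X).length i = some k := by
        intro X; rw [List.length_set]; exact h
      rw [pvSetD_some rb h, pvSetD_some _ (hX _), pvGetD_some _ (hX _), List.set_set,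
          List.getD_eq_getElem _ _ (by simpa using hk), List.getElem_set_self]
      rw [pvSetD_some rb h, pvGetD_some rb h]
      have : pvRowWrite (C+1) d v (rb.getD k []) = (pvRowWrite C d v (rb.getD k [])).set (C + d) (v C) := by
        simp [pvRowWrite, List.range_succ]
      rw [this, List.getD_eq_getElem _ _ hk]

-- pvRowWrite turns a good row into the padded copy row, and that row is good again
theorem pvGood_rowWrite (RC C : Nat) (hC : C <= RC) (f : Nat -> String) (xs : List String)
    (h : pvGoodRow RC C xs) :
    pvRowWrite C (RC - C) f xs = List.replicate (RC - C) "*" ++ (List.range C).map f := by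
  obtain ⟨hlen, htake⟩ := h
  rw [pvRowWrite_eq _ _ _ _ (by omega)]
  rw [show RC - C + C = RC from by omega, List.drop_eq_nil_of_le (by omega), List.append_nil, htake]

theorem pvGood_target (RC C : Nat) (hC : C <= RC) (f : Nat -> String) :
    pvGoodRow RC C (List.replicate (RC - C) "*" ++ (List.range C).map f) := by
  constructor
  . simp; omega
  . exact List.take_left' (by simp)

-- the first (wrapped) phase of A's loop keeps every row good and the length fixed
theorem pvPhase1 (RC C : Nat) (hC : C <= RC) (l : List Nat) (ix : Nat -> Int) (g : Nat -> Nat -> String) :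
    ∀ X : List (List String), (∀ j, (hj : j < X.length) -> pvGoodRow RC C X[j]) ->
      ((l.foldl (fun rb y => PySem.List.pySetD rb (ix y) (pvRowWrite C (RC - C) (g y) (PySem.List.pyGetD rb (ix y) []))) X).length = X.length ∧
       ∀ j, (hj : j < (l.foldl (fun rb y => PySem.List.pySetD rb (ix y) (pvRowWrite C (RC - C) (g y) (PySem.List.pyGetD rb (ix y) []))) X).length) ->
         pvGoodRow RC C (l.foldl (fun rb y => PySem.List.pySetD rb (ix y) (pvRowWrite C (RC - C) (g y) (PySem.List.pyGetD rb (ix y) []))) X)[j]) := by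
  induction l with
  | nil => intro X hX; exact ⟨rfl, hX⟩
  | cons y l ih =>
    intro X hX
    simp only [List.foldl_cons]
    have hstep : (PySem.List.pySetD X (ix y) (pvRowWrite C (RC - C) (g y) (PySem.List.pyGetD X (ix y) []))).length = X.length ∧
        ∀ j, (hj : j < (PySem.List.pySetD X (ix y) (pvRowWrite C (RC - C) (g y) (PySem.List.pyGetD X (ix y) []))).length) ->
          pvGoodRow RC C (PySem.List.pySetD X (ix y) (pvRowWrite C (RC - C) (g y) (PySem.List.pyGetD X (ix y) [])))[j] := by
      cases h : PySem.List.pyIdx? X.length (ix y) with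
      | none => rw [pvSetD_none X h]; exact ⟨rfl, hX⟩
      | some k =>
        have hk : k < X.length := pvIdx_lt h
        rw [pvSetD_some X h, pvGetD_some X h, List.getD_eq_getElem _ _ hk]
        refine ⟨List.length_set, ?_⟩
        intro j hj
        rw [List.getElem_set]
        split
        . rw [pvGood_rowWrite RC C hC _ _ (hX k hk)]
          exact pvGood_target RC C hC _
        . exact hX j (by simpa using hj)
    obtain ⟨hl1, hg1⟩ := hstep
    obtain ⟨hl2, hg2⟩ := ih _ hg1
    exact ⟨by rw [hl2, hl1], hg2⟩

-- A's fold after Nat normalisation equals the padded-rows form (no row wraparound)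
theorem pvA_char (board : List (List String)) (R C RR RC : Nat) (hR : R <= RR) (hC : C <= RC) :
    (List.range R).foldl (fun rb y =>
        (List.range C).foldl (fun rb' c =>
          rb'.set (y + (RR - R)) ((rb'.getD (y + (RR - R)) []).set (c + (RC - C)) ((board.getD y []).getD c ""))) rb)
      (List.replicate RR (List.replicate RC "*"))
    = List.replicate (RR - R) (List.replicate RC "*") ++
        (List.range R).map (fun r => List.replicate (RC - C) "*" ++ (List.range C).map (fun c => (board.getD r []).getD c "")) := by
  have hfun : (fun (rb : List (List String)) (y : Nat) =>
        (List.range C).foldl (fun rb' c =>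
          rb'.set (y + (RR - R)) ((rb'.getD (y + (RR - R)) []).set (c + (RC - C)) ((board.getD y []).getD c ""))) rb)
      = (fun rb y => rb.set (y + (RR - R)) (pvRowWrite C (RC - C) (fun c => (board.getD y []).getD c "") (rb.getD (y + (RR - R)) []))) := by
    funext rb y
    exact pvRowFactor C (RC - C) (y + (RR - R)) _ rb
  rw [hfun]
  rw [show (List.range R).foldl (fun rb y => rb.set (y + (RR - R)) (pvRowWrite C (RC - C) (fun c => (board.getD y []).getD c "") (rb.getD (y + (RR - R)) []))) (List.replicate RR (List.replicate RC "*"))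
      = pvBoardWrite R C (RR - R) (RC - C) (fun r c => (board.getD r []).getD c "") (List.replicate RR (List.replicate RC "*")) from rfl]
  rw [pvBoardWrite_eq _ _ _ _ _ _ (by simp; omega)]
  rw [List.take_replicate, List.drop_replicate, show RR - (RR - R + R) = 0 from by omega, List.replicate_zero, List.append_nil,
      show min (RR - R) RR = RR - R from by omega]
  congr 1
  apply List.map_congr_left
  intro r hr
  rw [List.mem_range] at hr
  rw [List.getD_replicate _ (by omega)]
  rw [pvRowWrite_eq _ _ _ _ (by simp; omega)]
  rw [List.take_replicate, List.drop_replicate, show RC - (RC - C + C) = 0 from by omega, List.replicate_zero, List.append_nil,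
      show min (RC - C) RC = RC - C from by omega]

-- A's fold in the row-wraparound case (RR < R ≤ 2 RR): the first W = R - RR writes land on the
-- bottom rows via negative indices and are then fully overwritten by the last RR writes
theorem pvA_char_wrap (board : List (List String)) (R C RR RC : Nat) (hRR : RR < R) (hR2 : R <= 2*RR) (hC : C <= RC) :
    (List.range R).foldl (fun (rb : List (List String)) (y : Nat) =>
        (List.range C).foldl (fun rb' c =>
          PySem.List.pySetD rb' ((y:Int) - ((R - RR : Nat) : Int))
            ((PySem.List.pyGetD rb' ((y:Int) - ((R - RR : Nat) : Int)) []).set (c + (RC - C)) ((board.getD y []).getD c ""))) rb)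
      (List.replicate RR (List.replicate RC "*"))
    = (List.range RR).map (fun r => List.replicate (RC - C) "*" ++ (List.range C).map (fun c => (board.getD ((R - RR) + r) []).getD c "")) := by
  have hfun : (fun (rb : List (List String)) (y : Nat) =>
        (List.range C).foldl (fun (rb' : List (List String)) (c : Nat) =>
          PySem.List.pySetD rb' ((y:Int) - ((R - RR : Nat) : Int))
            ((PySem.List.pyGetD rb' ((y:Int) - ((R - RR : Nat) : Int)) []).set (c + (RC - C)) ((board.getD y []).getD c ""))) rb)
      = (fun (rb : List (List String)) (y : Nat) => PySem.List.pySetD rb ((y:Int) - ((R - RR : Nat) : Int))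
          (pvRowWrite C (RC - C) (fun c => (board.getD y []).getD c "") (PySem.List.pyGetD rb ((y:Int) - ((R - RR : Nat) : Int)) []))) := by
    funext rb y
    exact pvRowFactorPy C (RC - C) _ _ rb
  rw [hfun]
  rw [show List.range R = List.range (R - RR) ++ (List.range RR).map (fun x => (R - RR) + x) from by
        rw [← List.range_add]; congr 1; omega]
  rw [List.foldl_append]
  obtain ⟨hlen1, hgood1⟩ := pvPhase1 RC C hC (List.range (R - RR)) (fun y => (y:Int) - ((R - RR : Nat) : Int))
    (fun y c => (board.getD y []).getD c "") (List.replicate RR (List.replicate RC "*"))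
    (by intro j hj
        rw [List.getElem_replicate]
        exact ⟨by simp, by rw [List.take_replicate, show min (RC - C) RC = RC - C from by omega]⟩)
  rw [List.length_replicate] at hlen1
  rw [List.foldl_map]
  have hfun2 : (fun (rb : List (List String)) (y : Nat) => PySem.List.pySetD rb ((((R - RR) + y : Nat) : Int) - ((R - RR : Nat) : Int))
        (pvRowWrite C (RC - C) (fun c => (board.getD ((R - RR) + y) []).getD c "") (PySem.List.pyGetD rb ((((R - RR) + y : Nat) : Int) - ((R - RR : Nat) : Int)) [])))
      = (fun (rb : List (List String)) (y : Nat) => rb.set (y + 0) (pvRowWrite C (RC - C) ((fun (r : Nat) (c : Nat) => (board.getD ((R - RR) + r) []).getD c "") y) (rb.getD (y + 0) []))) := by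
    funext rb y
    rw [show (((R - RR) + y : Nat) : Int) - ((R - RR : Nat) : Int) = ((y : Nat) : Int) from by push_cast; omega]
    rw [PySem.List.pySetD_natCast, PySem.List.pyGetD_natCast, Nat.add_zero]
  rw [hfun2]
  have hBW : ∀ X : List (List String), (List.range RR).foldl (fun (rb : List (List String)) (y : Nat) => rb.set (y + 0) (pvRowWrite C (RC - C) ((fun (r : Nat) (c : Nat) => (board.getD ((R - RR) + r) []).getD c "") y) (rb.getD (y + 0) []))) X
      = pvBoardWrite RR C 0 (RC - C) (fun r c => (board.getD ((R - RR) + r) []).getD c "") X := fun X => rfl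
  rw [hBW]
  rw [pvBoardWrite_eq _ _ _ _ _ _ (by rw [Nat.zero_add, hlen1])]
  rw [List.take_zero, List.nil_append, List.drop_eq_nil_of_le (by rw [Nat.zero_add, hlen1]), List.append_nil]
  apply List.map_congr_left
  intro r hr
  rw [List.mem_range] at hr
  rw [Nat.zero_add, List.getD_eq_getElem (n := r) _ _ (by rw [hlen1]; omega)]
  rw [pvGood_rowWrite RC C hC _ _ (hgood1 r (by rw [hlen1]; omega))]

-- B's fold equals the same padded-rows form (no row wraparound)
theorem pvB_char (board : List (List String)) (R C RR RC : Nat) (hR : R <= RR) (hC : C <= RC) :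
    (List.range RR).foldl (fun (out : List (List String)) (y : Nat) =>
        out ++ [if (y : Int) < ((RR - R : Nat) : Int) then List.replicate RC "*"
                else List.replicate (RC - C) "*" ++
                  (List.range C).map (fun c =>
                    (PySem.List.pyGetD board ((y : Int) - ((RR - R : Nat) : Int)) []).getD c "")]) []
    = List.replicate (RR - R) (List.replicate RC "*") ++
        (List.range R).map (fun r => List.replicate (RC - C) "*" ++ (List.range C).map (fun c => (board.getD r []).getD c "")) := by
  rw [PySem.List.foldl_append_singleton_eq_map, List.nil_append]
  rw [show List.range RR = List.range (RR - R) ++ (List.range R).map (fun x => (RR - R) + x) from by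
        rw [← List.range_add]; congr 1; omega]
  rw [List.map_append, List.map_map]
  congr 1
  . rw [List.map_congr_left (g := fun _ => List.replicate RC "*") ?_, List.map_const', List.length_range]
    intro y hy
    rw [List.mem_range] at hy
    rw [if_pos (by exact_mod_cast hy)]
  . apply List.map_congr_left
    intro j hj
    rw [List.mem_range] at hj
    simp only [Function.comp_apply]
    rw [if_neg (by push_cast; omega)]
    congr 1
    rw [show ((RR - R + j : Nat) : Int) - ((RR - R : Nat) : Int) = ((j : Nat) : Int) from by push_cast; omega]
    rw [PySem.List.pyGetD_natCast]

-- B's fold in the row-wraparound case: no prefix rows, every row is a padded copy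
theorem pvB_char_wrap (board : List (List String)) (C RR RC W : Nat) :
    (List.range RR).foldl (fun (out : List (List String)) (y : Nat) =>
        out ++ [if (y : Int) < -((W : Nat) : Int) then List.replicate RC "*"
                else List.replicate (RC - C) "*" ++
                  (List.range C).map (fun c => (board.getD (y + W) []).getD c "")]) []
    = (List.range RR).map (fun r => List.replicate (RC - C) "*" ++ (List.range C).map (fun c => (board.getD (W + r) []).getD c "")) := by
  rw [PySem.List.foldl_append_singleton_eq_map, List.nil_append]
  apply List.map_congr_left
  intro y hy
  rw [if_neg (by push_cast; omega)]
  rw [Nat.add_comm y W]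

-- a foldl whose step ignores the element is the identity
theorem pvFoldlConst {a : Type} (l : List Nat) (init : a) : l.foldl (fun x _ => x) init = init := by
  induction l generalizing init with
  | nil => rfl
  | cons y l ih => simpa using ih init

-- ===== VERDICT (by name: the statement is the Claim_ definition above) =====
theorem enlargeBoard_spec : Claim_equal_enlargeBoard := by
  intro board realrows realcols rows cols _hdom hpre
  unfold Spec_enlargeBoard
  unfold enlargeBoard enlargeBoard_alt
  simp only [PySem.List.pyRange_one, List.foldl_map, List.map_map, Int.sub_zero, zero_add,
    Function.comp_def, List.map_const', List.length_map, List.length_range]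
  by_cases hr0 : rows ≤ 0
  . -- no rows are copied: both sides are the all-star board
    rw [show rows.toNat = 0 from by omega]
    simp only [List.range_zero, List.foldl_nil]
    rw [PySem.List.foldl_append_singleton_eq_map, List.nil_append]
    rw [List.map_congr_left (g := fun _ => List.replicate realcols.toNat "*") ?_, List.map_const', List.length_range]
    intro y hy
    rw [List.mem_range] at hy
    rw [if_pos (by omega)]
  . by_cases hc0 : cols ≤ 0
    . -- no columns are copied: both sides are the all-star board
      rw [show cols.toNat = 0 from by omega]
      simp only [List.range_zero, List.foldl_nil, List.map_nil]
      rw [pvFoldlConst]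
      rw [PySem.List.foldl_append_singleton_eq_map, List.nil_append]
      rw [List.map_congr_left (g := fun _ => List.replicate realcols.toNat "*") ?_, List.map_const', List.length_range]
      intro y hy
      rw [List.mem_range] at hy
      by_cases hcond : (y : Int) < realrows - rows
      . rw [if_pos hcond]
      . rw [if_neg hcond, List.append_nil, show (realcols - ((0:Nat):Int)).toNat = realcols.toNat from by omega]
    . -- a real copy happens
      have hmain : 0 < realrows ∧ 0 < realcols ∧ rows ≤ 2*realrows ∧ cols ≤ realcols ∧
          rows ≤ (board.length : Int) ∧ ∀ r ∈ board.take rows.toNat, cols ≤ (r.length : Int) := by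
        unfold Pre_enlargeBoard at hpre
        rcases hpre with h | h | h
        . omega
        . omega
        . exact h
      obtain ⟨hrr, hrc, hr2, hcle, hbl, hbw⟩ := hmain
      have hpad : (realcols - ((cols.toNat : Nat) : Int)).toNat = realcols.toNat - cols.toNat := by omega
      by_cases hw : rows ≤ realrows
      . -- rows fit: the non-wrapping proof
        have hrd : realrows - rows = ((realrows.toNat - rows.toNat : Nat) : Int) := by omega
        have hcd : realcols - cols = ((realcols.toNat - cols.toNat : Nat) : Int) := by omega
        simp only [hrd, hcd, hpad, Int.toNat_natCast, ← Int.natCast_add,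
          PySem.List.pySetD_natCast, PySem.List.pyGetD_natCast]
        rw [pvA_char board rows.toNat cols.toNat realrows.toNat realcols.toNat (by omega) (by omega)]
        rw [pvB_char board rows.toNat cols.toNat realrows.toNat realcols.toNat (by omega) (by omega)]
      . -- row wraparound: realrows < rows ≤ 2*realrows
        have hWint : realrows - rows = -(((rows.toNat - realrows.toNat : Nat)) : Int) := by omega
        have hcd : realcols - cols = ((realcols.toNat - cols.toNat : Nat) : Int) := by omega
        simp only [hWint, hcd, hpad, Int.toNat_natCast, ← Int.natCast_add, ← sub_eq_add_neg, sub_neg_eq_add,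
          PySem.List.pySetD_natCast, PySem.List.pyGetD_natCast]
        rw [pvA_char_wrap board rows.toNat cols.toNat realrows.toNat realcols.toNat (by omega) (by omega) (by omega)]
        rw [pvB_char_wrap board cols.toNat realrows.toNat realcols.toNat (rows.toNat - realrows.toNat)]
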